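-- pv_equiv track=rewrite | github.com/datevid/EquiPlayer | AppRoot/model/equigroup07.py | ifPlayerRepeat
-- ===== SOURCE A (Python) =====
-- def ifPlayerRepeat(enfrentamiento):
--     jugadores = set()  # Conjunto para almacenar los índices de jugadores
--
--     # Iterar sobre cada equipo en el enfrentamiento
--     for equipo in enfrentamiento:
--         for jugadorIndex in equipo:
--             # Verificar si el índice de jugador ya está en el conjunto "jugadores"
--             if jugadorIndex in jugadores:
--                 return True  # Si el índice de jugador se repite, retornar True
--             jugadores.add(jugadorIndex)  # Agregar el índice de jugador al conjunto
--
--     return False  # Si no se encontraron repeticiones, retornar False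
-- ===== SOURCE B (Python) =====
-- def ifPlayerRepeat(enfrentamiento):
--     flat = [jugadorIndex for equipo in enfrentamiento for jugadorIndex in equipo]
--     return len(set(flat)) != len(flat)
-- ===== Notes on version B (the rewrite author's own statement) =====
-- stated objective: simpler
-- what changed: Replaces the nested loops with an incremental membership test and early return by flattening all indices into one list and comparing the deduplicated size with the list length.
import Mathlib
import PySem

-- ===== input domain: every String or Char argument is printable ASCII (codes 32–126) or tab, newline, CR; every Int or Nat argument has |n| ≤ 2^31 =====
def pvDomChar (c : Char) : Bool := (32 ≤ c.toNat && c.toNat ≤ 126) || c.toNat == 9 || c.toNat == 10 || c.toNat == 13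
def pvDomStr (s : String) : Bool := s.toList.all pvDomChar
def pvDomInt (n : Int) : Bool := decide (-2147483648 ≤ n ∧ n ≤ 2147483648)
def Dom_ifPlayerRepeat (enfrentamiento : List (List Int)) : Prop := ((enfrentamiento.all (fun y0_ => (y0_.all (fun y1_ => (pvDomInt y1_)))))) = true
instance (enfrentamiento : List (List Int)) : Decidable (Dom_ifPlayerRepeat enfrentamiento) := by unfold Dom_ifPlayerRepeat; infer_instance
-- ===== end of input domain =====

-- B flattens all player indices into one list and compares deduplicated size
-- with list length, instead of A's nested loops with an early return (objective: simpler).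

-- ===== PORT A =====
-- inner 'for jugadorIndex in equipo' loop: none = 'return True' was hit, some s = updated set
def ifPlayerRepeatTeam (equipo : List Int) (jugadores : PySem.Set Int) : Option (PySem.Set Int) :=
  match equipo with
  | [] => some jugadores
  | j :: rest =>
      if PySem.Set.contains jugadores j then none
      else ifPlayerRepeatTeam rest (PySem.Set.add jugadores j)

-- outer 'for equipo in enfrentamiento' loop
def ifPlayerRepeatGo (enfrentamiento : List (List Int)) (jugadores : PySem.Set Int) : Bool :=
  match enfrentamiento with
  | [] => false
  | equipo :: rest =>
      match ifPlayerRepeatTeam equipo jugadores with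
      | none => true
      | some jugadores' => ifPlayerRepeatGo rest jugadores'

def ifPlayerRepeat (enfrentamiento : List (List Int)) : Bool :=
  ifPlayerRepeatGo enfrentamiento PySem.Set.empty

-- ===== PORT B =====
def ifPlayerRepeat_alt (enfrentamiento : List (List Int)) : Bool :=
  let flat := enfrentamiento.flatMap (fun equipo => equipo)
  !((PySem.Set.ofList flat).length == flat.length)

-- ===== PRECONDITION & SPEC =====
def Spec_ifPlayerRepeat (enfrentamiento : List (List Int)) (out : Bool) : Prop := out = ifPlayerRepeat_alt enfrentamiento
instance (enfrentamiento : List (List Int)) (out : Bool) : Decidable (Spec_ifPlayerRepeat enfrentamiento out) := by unfold Spec_ifPlayerRepeat; infer_instance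

-- ===== CLAIM (what is proved, stated in full; the proofs are below) =====
def Claim_equal_ifPlayerRepeat : Prop := ∀ (enfrentamiento : List (List Int)), Dom_ifPlayerRepeat enfrentamiento → Spec_ifPlayerRepeat enfrentamiento (ifPlayerRepeat enfrentamiento)

-- ===== LEMMAS AND PROOFS =====

def goFlat (xs : List Int) (s : PySem.Set Int) : Bool :=
  match xs with
  | [] => false
  | x :: rest => if PySem.Set.contains s x then true else goFlat rest (PySem.Set.add s x)

theorem goFlat_append (t rest : List Int) (s : PySem.Set Int) :
    goFlat (t ++ rest) s =
      (match ifPlayerRepeatTeam t s with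
       | none => true
       | some s' => goFlat rest s') := by
  induction t generalizing s with
  | nil => rfl
  | cons x xs ih =>
      simp only [List.cons_append, goFlat, ifPlayerRepeatTeam]
      split_ifs with h
      · rfl
      · exact ih _

theorem go_eq_goFlat (e : List (List Int)) (s : PySem.Set Int) :
    ifPlayerRepeatGo e s = goFlat (e.flatMap (fun equipo => equipo)) s := by
  induction e generalizing s with
  | nil => rfl
  | cons t ts ih =>
      simp only [List.flatMap_cons, goFlat_append, ifPlayerRepeatGo]
      cases ifPlayerRepeatTeam t s with
      | none => rfl
      | some s' => exact ih s'

theorem length_update_le (xs : List Int) (s : PySem.Set Int) :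
    (PySem.Set.update s xs).length ≤ s.length + xs.length := by
  induction xs generalizing s with
  | nil => simp [PySem.Set.update]
  | cons x rest ih =>
      have h1 : (PySem.Set.add s x).length ≤ s.length + 1 := by
        simp only [PySem.Set.add]
        split_ifs <;> simp
      calc (PySem.Set.update s (x :: rest)).length
          = (PySem.Set.update (PySem.Set.add s x) rest).length := rfl
        _ ≤ (PySem.Set.add s x).length + rest.length := ih _
        _ ≤ s.length + (x :: rest).length := by simp only [List.length_cons]; omega

theorem goFlat_eq (xs : List Int) (s : PySem.Set Int) :
    goFlat xs s = !((PySem.Set.update s xs).length == s.length + xs.length) := by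
  induction xs generalizing s with
  | nil => simp [goFlat, PySem.Set.update]
  | cons x rest ih =>
      have hupd : PySem.Set.update s (x :: rest) = PySem.Set.update (PySem.Set.add s x) rest := rfl
      simp only [goFlat]
      split_ifs with h
      · have hx : x ∈ s := by simpa using h
        have hadd : PySem.Set.add s x = s := PySem.Set.add_of_mem hx
        have hne : ((PySem.Set.add s x).update rest).length ≠ s.length + (rest.length + 1) := by
          rw [hadd]; have := length_update_le rest s; omega
        simp only [hupd, List.length_cons]
        simp [hne]
      · have hx : x ∉ s := by simpa using h
        have hadd : PySem.Set.add s x = s ++ [x] := PySem.Set.add_of_not_mem hx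
        have h2 : (PySem.Set.add s x).length = s.length + 1 := by simp [hadd]
        have harith : (PySem.Set.add s x).length + rest.length = s.length + (x :: rest).length := by
          rw [h2]; simp only [List.length_cons]; omega
        rw [ih (PySem.Set.add s x), hupd, harith]

-- ===== VERDICT (by name: the statement is the Claim_ definition above) =====
theorem ifPlayerRepeat_spec : Claim_equal_ifPlayerRepeat := by
  intro e _
  unfold Spec_ifPlayerRepeat ifPlayerRepeat ifPlayerRepeat_alt
  rw [go_eq_goFlat, goFlat_eq]
  simp [PySem.Set.update, PySem.Set.empty, PySem.Set.ofList_eq_foldl]
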